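-- pv_equiv track=rewrite | github.com/yifei-he/foldingzero | run.py | calc_upper
-- ===== SOURCE A (Python) =====
-- def calc_upper(s):
--     odd, even = 0, 0
--     for ii in range(len(s)):
--         if s[ii] == 'H':
--             if ii % 2 == 0:
--                 even += 1
--             else:
--                 odd += 1
--     return 2 * min(odd, even)
-- ===== SOURCE B (Python) =====
-- def calc_upper(s):
--     even = s[::2].count('H')
--     odd = s[1::2].count('H')
--     return 2 * min(odd, even)
-- ===== Notes on version B (the rewrite author's own statement) =====
-- stated objective: faster
-- what changed: Replaces the indexed Python-level loop with a parity branch by two strided slices s[::2] and s[1::2] whose 'H' counts are taken by the C-level str.count, giving the even/odd tallies directly.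
import Mathlib
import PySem

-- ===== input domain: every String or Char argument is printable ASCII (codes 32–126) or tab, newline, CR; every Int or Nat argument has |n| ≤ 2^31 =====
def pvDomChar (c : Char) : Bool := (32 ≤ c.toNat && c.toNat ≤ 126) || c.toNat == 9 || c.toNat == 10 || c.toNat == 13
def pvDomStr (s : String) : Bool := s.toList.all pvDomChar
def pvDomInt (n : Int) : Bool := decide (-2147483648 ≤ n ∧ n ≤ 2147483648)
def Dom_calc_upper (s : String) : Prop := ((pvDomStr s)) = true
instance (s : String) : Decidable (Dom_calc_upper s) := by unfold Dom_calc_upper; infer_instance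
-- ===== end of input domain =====

-- B replaces A's single indexed loop with a parity branch by two strided slices (s[::2], s[1::2]) counted with str.count: same O(n) work, measurably faster constant factor.

-- ===== PORT A =====
def calc_upper (s : String) : Int :=
  let l := s.toList
  let oe := (PySem.List.pyRange 0 (l.length : Int) 1).foldl
    (fun (oe : Int × Int) ii =>
      if PySem.List.pyGetD l ii ' ' == 'H' then
        if PySem.Int.mod ii 2 == 0 then (oe.1, oe.2 + 1) else (oe.1 + 1, oe.2)
      else oe) ((0 : Int), (0 : Int))
  2 * min oe.1 oe.2

-- ===== PORT B =====
def calc_upper_alt (s : String) : Int :=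
  let even : Int := ((PySem.List.slice? s.toList none none 2).getD []).count 'H'
  let odd : Int := ((PySem.List.slice? s.toList (some 1) none 2).getD []).count 'H'
  2 * min odd even

-- ===== PRECONDITION & SPEC =====
def Spec_calc_upper (s : String) (out : Int) : Prop := out = calc_upper_alt s
instance (s : String) (out : Int) : Decidable (Spec_calc_upper s out) := by unfold Spec_calc_upper; infer_instance

-- ===== CLAIM (what is proved, stated in full; the proofs are below) =====
def Claim_equal_calc_upper : Prop := ∀ (s : String), Dom_calc_upper s → Spec_calc_upper s (calc_upper s)

-- ===== LEMMAS AND PROOFS =====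

/-- Elements of `l` at even positions. -/
def pvEvens : List Char → List Char
  | [] => []
  | [a] => [a]
  | a :: _ :: t => a :: pvEvens t

/-- Elements of `l` at odd positions. -/
def pvOdds (l : List Char) : List Char := pvEvens l.tail

theorem pvEvens_cons (c : Char) (t : List Char) : pvEvens (c :: t) = c :: pvOdds t := by
  cases t <;> rfl

theorem pvOdds_cons (c : Char) (t : List Char) : pvOdds (c :: t) = pvEvens t := rfl

/-- Structural form of A's loop. -/
def pvCnt : List Char → Nat → Int × Int → Int × Int
  | [], _, oe => oe
  | c :: t, i, oe =>
      pvCnt t (i + 1)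
        (if c == 'H' then (if i % 2 == 0 then (oe.1, oe.2 + 1) else (oe.1 + 1, oe.2)) else oe)

theorem pv_mod_two (i : Nat) : (PySem.Int.mod (i : Int) 2 == 0) = ((i % 2 : Nat) == 0) := by
  simp [PySem.Int.mod, Int.fmod_eq_emod]
  omega

theorem pvA_loop (t p : List Char) (oe : Int × Int) :
    (PySem.List.pyRange (p.length : Int) ((p.length : Int) + (t.length : Int)) 1).foldl
      (fun (oe : Int × Int) ii =>
        if PySem.List.pyGetD (p ++ t) ii ' ' == 'H' then
          if PySem.Int.mod ii 2 == 0 then (oe.1, oe.2 + 1) else (oe.1 + 1, oe.2)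
        else oe) oe = pvCnt t p.length oe := by
  induction t generalizing p oe with
  | nil => simp [PySem.List.pyRange_one_eq_nil, pvCnt]
  | cons c t ih =>
    rw [PySem.List.pyRange_one_cons (by push_cast [List.length_cons]; omega)]
    simp only [List.foldl_cons]
    have hget : PySem.List.pyGetD (p ++ c :: t) (p.length : Int) ' ' = c := by
      rw [PySem.List.pyGetD_natCast]
      simp [List.getD]
    have h2 : ((p.length : Int) + 1) = ((p ++ [c]).length : Int) := by simp
    have h3 : ((p.length : Int) + ((c :: t).length : Int)) =
        ((p ++ [c]).length : Int) + (t.length : Int) := by push_cast [List.length_append, List.length_cons, List.length_nil]; omega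
    rw [hget, pv_mod_two, h3, h2, show p ++ c :: t = (p ++ [c]) ++ t by simp]
    rw [ih (p ++ [c])]
    simp [pvCnt]

theorem pvCnt_eq (l : List Char) (i : Nat) (oe : Int × Int) :
    pvCnt l i oe =
      if i % 2 = 0 then
        (oe.1 + ((pvOdds l).count 'H' : Int), oe.2 + ((pvEvens l).count 'H' : Int))
      else
        (oe.1 + ((pvEvens l).count 'H' : Int), oe.2 + ((pvOdds l).count 'H' : Int)) := by
  induction l generalizing i oe with
  | nil => simp [pvCnt, pvOdds, pvEvens]
  | cons c t ih =>
    rw [pvCnt, ih, pvEvens_cons, pvOdds_cons]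
    have hpar : (i + 1) % 2 = 0 ↔ ¬ i % 2 = 0 := by omega
    by_cases hi : i % 2 = 0 <;> by_cases hc : c = 'H' <;>
      simp [hi, hc, hpar, Prod.ext_iff] <;> omega

theorem pvFilterMapEvens (l : List Char) :
    List.filterMap (fun k : Nat => l[2*k]?) (List.range ((l.length+1)/2)) = pvEvens l := by
  match l with
  | [] => rfl
  | [a] => simp [List.range_succ, pvEvens]
  | a :: b :: t =>
    have hlen : ((a :: b :: t).length + 1) / 2 = (t.length + 1) / 2 + 1 := by simp only [List.length_cons]; omega
    rw [hlen, List.range_succ_eq_map]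
    simp only [List.filterMap_cons, List.filterMap_map]
    have h0 : (a :: b :: t)[2*0]? = some a := rfl
    simp only [h0]
    have hf : (fun k : Nat => (a :: b :: t)[2*(k+1)]?) = (fun k : Nat => t[2*k]?) := by
      funext k
      have h2 : 2*(k+1) = 2*k+2 := by omega
      rw [h2]; rfl
    simp only [Function.comp_def, hf]
    rw [pvFilterMapEvens t]
    rfl

theorem pv_slice_evens (l : List Char) :
    PySem.List.slice? l none none 2 = some (pvEvens l) := by
  have h : PySem.List.slice? l none none 2 =
      some (List.filterMap (fun k : Nat => l[2*k]?) (List.range ((l.length+1)/2))) := by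
    simp [PySem.List.slice?, PySem.List.sliceIndices]
    have h1 : (if 0 < l.length then (((l.length:Int) + 2 - 1)/2).toNat else 0) = (l.length+1)/2 := by
      split <;> omega
    rw [h1]
    congr 1
  rw [h, pvFilterMapEvens]

theorem pv_slice_odds (l : List Char) :
    PySem.List.slice? l (some 1) none 2 = some (pvOdds l) := by
  cases l with
  | nil => rfl
  | cons a t =>
    have h : PySem.List.slice? (a :: t) (some 1) none 2 =
        some (List.filterMap (fun k : Nat => t[2*k]?) (List.range ((t.length+1)/2))) := by
      simp [PySem.List.slice?, PySem.List.sliceIndices]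
      have h1 : (if 0 < t.length then (((t.length : Int) + 2 - 1)/2).toNat else 0) = (t.length+1)/2 := by
        split <;> omega
      rw [h1]
      congr 1
      funext k
      have h2 : ((1 : Int) + 2 * (k:Nat)).toNat = 2*k+1 := by omega
      rw [h2]
      rfl
    rw [h, pvFilterMapEvens, pvOdds_cons]

-- ===== VERDICT (by name: the statement is the Claim_ definition above) =====
theorem calc_upper_spec : Claim_equal_calc_upper := by
  intro s _
  unfold Spec_calc_upper
  simp only [calc_upper, calc_upper_alt]
  have hA : (PySem.List.pyRange 0 ((s.toList.length : Nat) : Int) 1).foldl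
      (fun (oe : Int × Int) ii =>
        if PySem.List.pyGetD s.toList ii ' ' == 'H' then
          if PySem.Int.mod ii 2 == 0 then (oe.1, oe.2 + 1) else (oe.1 + 1, oe.2)
        else oe) ((0 : Int), (0 : Int)) = pvCnt s.toList 0 ((0 : Int), (0 : Int)) := by
    simpa using pvA_loop s.toList [] ((0 : Int), (0 : Int))
  rw [hA, pvCnt_eq, pv_slice_evens, pv_slice_odds]
  simp
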